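-- pv_equiv track=rewrite | github.com/iZhang/Python | CS101_Eclipse/apt_speeddial/src/SpeedDial.py | assignNumbers
-- ===== SOURCE A (Python) =====
-- def assignNumbers(numbers,howMany,slots):
--
--     total = sum(howMany[i]*len(str(val)) for i,val in enumerate(numbers))
--
--     saved = [howMany[i] * len(str(val)) - 2*howMany[i] for i,val in enumerate(numbers)]
--
--     saved.sort()
--
--     saved_presses = saved[-slots:]
--
--     dummy = 0
--     for i in range(0,len(saved_presses)):
--         dummy += saved_presses[i]
--
--     return (total - dummy)
-- ===== SOURCE B (Python) =====
-- # B: one pass to build totals/savings, then quickselect-style partial selection of the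
-- # top-`slots` savings (no full sort). For slots <= 0 B subtracts nothing (no slots assigned).
-- def assignNumbers(numbers, howMany, slots):
--     total = 0
--     saved = []
--     for val, h in zip(numbers, howMany):
--         L = len(str(val))
--         total += h * L
--         saved.append(h * (L - 2))
--     k = len(saved) if slots > len(saved) else (slots if slots > 0 else 0)
--     return total - _sum_k_largest(saved, k)
--
-- def _sum_k_largest(xs, k):
--     # sum of the k largest elements of xs, by recursive three-way partitioning
--     if k <= 0:
--         return 0
--     if k >= len(xs):
--         return sum(xs)
--     p = xs[len(xs) // 2]
--     hi = [x for x in xs if x > p]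
--     eq = [x for x in xs if x == p]
--     if k <= len(hi):
--         return _sum_k_largest(hi, k)
--     if k <= len(hi) + len(eq):
--         return sum(hi) + p * (k - len(hi))
--     lo = [x for x in xs if x < p]
--     return sum(hi) + sum(eq) + _sum_k_largest(lo, k - len(hi) - len(eq))
-- ===== Notes on version B (the rewrite author's own statement) =====
-- stated objective: alternative
-- what changed: B builds total and savings in one zip pass and replaces A's full sort plus suffix slice by a quickselect-style three-way-partition selection of the top-`slots` savings, subtracting nothing when slots <= 0; it trades the library sort for an expected-linear selection of the same values.
-- intended difference: On inputs with slots <= 0 and -slots < len(numbers) whose corresponding suffix of the sorted savings has nonzero sum, A returns the total minus that accidental suffix sum (saved[-slots:] is a nonempty slice for non-positive slots), while B returns the plain total of presses, the intended value when no speed-dial slots are assigned. — e.g. on assignNumbers([100], [1], 0): A returns 2, B returns 3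
import Mathlib
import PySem

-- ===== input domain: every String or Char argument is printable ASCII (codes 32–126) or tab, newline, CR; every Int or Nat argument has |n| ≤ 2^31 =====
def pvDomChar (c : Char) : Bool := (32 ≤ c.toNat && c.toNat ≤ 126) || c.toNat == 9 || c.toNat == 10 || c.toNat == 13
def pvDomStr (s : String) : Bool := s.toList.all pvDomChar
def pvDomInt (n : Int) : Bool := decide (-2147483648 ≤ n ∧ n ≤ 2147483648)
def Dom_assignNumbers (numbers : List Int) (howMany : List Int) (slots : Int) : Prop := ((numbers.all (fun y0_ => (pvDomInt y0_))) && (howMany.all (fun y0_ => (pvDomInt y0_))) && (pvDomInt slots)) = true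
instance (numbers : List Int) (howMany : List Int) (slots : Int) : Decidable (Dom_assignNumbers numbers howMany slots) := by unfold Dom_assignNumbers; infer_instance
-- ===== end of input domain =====

-- B replaces A's full sort of the savings list by a one-pass build plus a quickselect-style
-- partial selection of the top-`slots` savings; for slots ≤ 0 B subtracts nothing (see D_ below).

-- len(str(v)) — the number of characters of Python's str(v); shared leaf helper of both ports
def pvDigits (v : Int) : Int := ((PySem.Int.toChars v).length : Int)

-- ===== PORT A =====
def assignNumbers (numbers : List Int) (howMany : List Int) (slots : Int) : Int :=
  -- total = sum(howMany[i]*len(str(val)) for i,val in enumerate(numbers))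
  let total := (PySem.List.enumerate numbers 0).foldl
    (fun acc p => acc + PySem.List.pyGetD howMany p.1 0 * pvDigits p.2) 0
  -- saved = [howMany[i]*len(str(val)) - 2*howMany[i] for i,val in enumerate(numbers)]
  let saved := (PySem.List.enumerate numbers 0).map
    (fun p => PySem.List.pyGetD howMany p.1 0 * pvDigits p.2 - 2 * PySem.List.pyGetD howMany p.1 0)
  -- saved.sort()
  let savedS := PySem.List.sorted saved (fun x => x) false
  -- saved_presses = saved[-slots:]
  let saved_presses := PySem.List.slice savedS (some (-slots)) none
  -- dummy = 0; for i in range(0, len(saved_presses)): dummy += saved_presses[i]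
  let dummy := (PySem.List.pyRange 0 (saved_presses.length : Int) 1).foldl
    (fun acc i => acc + PySem.List.pyGetD saved_presses i 0) 0
  total - dummy

-- ===== PORT B =====
-- sum of the k largest elements of xs, by recursive three-way partitioning (quickselect style);
-- the Nat argument is the canonical structural bound (list length, each partition is shorter) —
-- pvSumKLargest xs k below calls it with fuel xs.length + 1, which the recursion never exhausts
def pvSumKAux (fuel : Nat) (xs : List Int) (k : Int) : Int :=
  match fuel with
  | 0 => 0
  | fuel + 1 =>
    if k ≤ 0 then 0
    else if (xs.length : Int) ≤ k then xs.sum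
    else
      let p := xs.getD (xs.length / 2) 0   -- index len(xs)//2 is always in range here
      let hi := xs.filter fun x => p < x
      let eq := xs.filter fun x => x = p
      if k ≤ (hi.length : Int) then pvSumKAux fuel hi k
      else if k ≤ (hi.length : Int) + (eq.length : Int) then hi.sum + p * (k - hi.length)
      else
        let lo := xs.filter fun x => x < p
        hi.sum + eq.sum + pvSumKAux fuel lo (k - hi.length - eq.length)

def pvSumKLargest (xs : List Int) (k : Int) : Int := pvSumKAux (xs.length + 1) xs k

def assignNumbers_alt (numbers : List Int) (howMany : List Int) (slots : Int) : Int :=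
  let pairs := numbers.zip howMany
  let total := pairs.foldl (fun acc p => acc + p.2 * pvDigits p.1) 0
  let saved := pairs.map (fun p => p.2 * (pvDigits p.1 - 2))
  let k : Int := if (saved.length : Int) < slots then ((saved.length : Int))
                 else if 0 < slots then slots else 0
  total - pvSumKLargest saved k

-- ===== PRECONDITION & SPEC =====
-- Pre_ excludes exactly the inputs where A raises IndexError (howMany shorter than numbers).
def Pre_assignNumbers (numbers : List Int) (howMany : List Int) (slots : Int) : Prop :=
  numbers.length ≤ howMany.length
instance (numbers : List Int) (howMany : List Int) (slots : Int) : Decidable (Pre_assignNumbers numbers howMany slots) := by unfold Pre_assignNumbers; infer_instance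

def pvWitness_assignNumbers : List Int × List Int × Int := ([3, 1000, -25], [2, 5, 1], 1)

-- On inputs with slots ≤ 0 and -slots < len(numbers) whose corresponding suffix of the sorted
-- savings has nonzero sum, A subtracts that accidental suffix sum (saved[-slots:] is a nonempty
-- slice for non-positive slots), while B subtracts nothing — the intended result when no
-- speed-dial slots are assigned is the plain total of presses.
def D_assignNumbers (numbers : List Int) (howMany : List Int) (slots : Int) : Prop :=
  slots ≤ 0 ∧ -slots < (numbers.length : Int) ∧
  (((((numbers.zip howMany).map (fun p => p.2 * (pvDigits p.1 - 2))).insertionSort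
      (fun a b => a ≤ b)).drop (-slots).toNat).sum ≠ 0)
instance (numbers : List Int) (howMany : List Int) (slots : Int) : Decidable (D_assignNumbers numbers howMany slots) := by unfold D_assignNumbers; infer_instance

def Spec_assignNumbers (numbers : List Int) (howMany : List Int) (slots : Int) (out : Int) : Prop := ¬ D_assignNumbers numbers howMany slots → out = assignNumbers_alt numbers howMany slots
instance (numbers : List Int) (howMany : List Int) (slots : Int) (out : Int) : Decidable (Spec_assignNumbers numbers howMany slots out) := by unfold Spec_assignNumbers; infer_instance

def pvDiffWitness_assignNumbers : List Int × List Int × Int := ([100], [1], 0)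
def pvDiffWitnessOut_assignNumbers : Int × Int := (2, 3)

-- ===== CLAIM (what is proved, stated in full; the proofs are below) =====
def Claim_unchanged_assignNumbers : Prop := ∀ (numbers : List Int) (howMany : List Int) (slots : Int), Dom_assignNumbers numbers howMany slots → Pre_assignNumbers numbers howMany slots → Spec_assignNumbers numbers howMany slots (assignNumbers numbers howMany slots)
def Claim_changed_assignNumbers : Prop := Dom_assignNumbers (pvDiffWitness_assignNumbers.1) (pvDiffWitness_assignNumbers.2.1) (pvDiffWitness_assignNumbers.2.2) ∧ Pre_assignNumbers (pvDiffWitness_assignNumbers.1) (pvDiffWitness_assignNumbers.2.1) (pvDiffWitness_assignNumbers.2.2) ∧ D_assignNumbers (pvDiffWitness_assignNumbers.1) (pvDiffWitness_assignNumbers.2.1) (pvDiffWitness_assignNumbers.2.2) ∧ assignNumbers (pvDiffWitness_assignNumbers.1) (pvDiffWitness_assignNumbers.2.1) (pvDiffWitness_assignNumbers.2.2) = pvDiffWitnessOut_assignNumbers.1 ∧ assignNumbers_alt (pvDiffWitness_assignNumbers.1) (pvDiffWitness_assignNumbers.2.1) (pvDiffWitness_assignNumbers.2.2) = pvDiffWitnessOut_assignNumbers.2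 ∧ pvDiffWitnessOut_assignNumbers.1 ≠ pvDiffWitnessOut_assignNumbers.2
def Claim_exact_assignNumbers : Prop := ∀ (numbers : List Int) (howMany : List Int) (slots : Int), Dom_assignNumbers numbers howMany slots → Pre_assignNumbers numbers howMany slots → D_assignNumbers numbers howMany slots → assignNumbers numbers howMany slots ≠ assignNumbers_alt numbers howMany slots

-- ===== LEMMAS AND PROOFS =====

-- proof-only abbreviations: B's savings list and total
def pvSv (numbers howMany : List Int) : List Int :=
  (numbers.zip howMany).map (fun p => p.2 * (pvDigits p.1 - 2))
def pvTot (numbers howMany : List Int) : Int :=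
  ((numbers.zip howMany).map (fun p => p.2 * pvDigits p.1)).sum

theorem pvEnum_zip (numbers howMany : List Int) (h : numbers.length ≤ howMany.length)
    (f : Int → Int → Int) :
    ((PySem.List.enumerate numbers 0).map (fun p => f (PySem.List.pyGetD howMany p.1 0) p.2))
      = ((numbers.zip howMany).map (fun p => f p.2 p.1)) := by
  apply List.ext_getElem
  · simp [PySem.List.length_enumerate, List.length_zip]; omega
  · intro i h1 h2
    simp only [List.getElem_map]
    have hi1 : i < (PySem.List.enumerate numbers 0).length := by simpa using h1
    rw [PySem.List.getElem_enumerate numbers 0 i hi1, List.getElem_zip]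
    have hcast : (0 : Int) + (i : Nat) = ((i : Nat) : Int) := by omega
    rw [hcast, PySem.List.pyGetD_natCast]
    have hilt : i < howMany.length := by
      simp [PySem.List.length_enumerate] at h1; omega
    rw [List.getD_eq_getElem howMany 0 hilt]

theorem pvSumK_drop : ∀ (fuel : Nat) (xs s : List Int) (k : Nat), xs.length < fuel →
    s.Perm xs → s.Pairwise (· ≤ ·) → k ≤ xs.length →
    pvSumKAux fuel xs (k : Int) = (s.drop (xs.length - k)).sum := by
  intro fuel
  induction fuel with
  | zero => intro xs s k hn; omega
  | succ fuel IH =>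
    intro xs s k hn hperm hsort hk
    have hslen : s.length = xs.length := hperm.length_eq
    rw [pvSumKAux]
    by_cases hk0 : (k : Int) ≤ 0
    · have : k = 0 := by omega
      subst this
      rw [if_pos hk0]
      rw [Nat.sub_zero, List.drop_eq_nil_of_le (by omega), List.sum_nil]
    rw [if_neg hk0]
    by_cases hlenk : (xs.length : Int) ≤ (k : Int)
    · have : k = xs.length := by omega
      rw [if_pos hlenk, this, Nat.sub_self, List.drop_zero]
      exact (hperm.sum_eq).symm
    rw [if_neg hlenk]
    have hklt : k < xs.length := by omega
    have hk1 : 1 ≤ k := by omega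
    have hxs0 : 0 < xs.length := by omega
    simp only []
    set p := xs.getD (xs.length / 2) 0 with hp
    have hpmem : p ∈ xs := by
      rw [hp, List.getD_eq_getElem xs 0 (Nat.div_lt_self hxs0 (by norm_num))]
      exact List.getElem_mem _
    set hi := xs.filter (fun x => decide (p < x)) with hhi
    set eqL := xs.filter (fun x => decide (x = p)) with heq
    set lo := xs.filter (fun x => decide (x < p)) with hlo
    -- membership facts
    have hmem_hi : ∀ x ∈ hi, p < x := by intro x hx; rw [hhi] at hx; simp [List.mem_filter] at hx; exact hx.2
    have hmem_eq : ∀ x ∈ eqL, x = p := by intro x hx; rw [heq] at hx; simp [List.mem_filter] at hx; exact hx.2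
    have hmem_lo : ∀ x ∈ lo, x < p := by intro x hx; rw [hlo] at hx; simp [List.mem_filter] at hx; exact hx.2
    -- the three-way partition is a permutation of xs
    have hperm3 : (lo ++ (eqL ++ hi)).Perm xs := by
      rw [List.perm_iff_count]
      intro a
      have c1 : List.count a lo = if a < p then List.count a xs else 0 := by
        split_ifs with h
        · exact List.count_filter (by simp [h])
        · refine List.count_eq_zero.mpr (fun hmem => h (hmem_lo a hmem))
      have c2 : List.count a eqL = if a = p then List.count a xs else 0 := by
        split_ifs with h
        · exact List.count_filter (by simp [h])
        · refine List.count_eq_zero.mpr (fun hmem => h (hmem_eq a hmem))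
      have c3 : List.count a hi = if p < a then List.count a xs else 0 := by
        split_ifs with h
        · exact List.count_filter (by simp [h])
        · refine List.count_eq_zero.mpr (fun hmem => h (hmem_hi a hmem))
      simp only [List.count_append, c1, c2, c3]
      rcases lt_trichotomy a p with h | h | h
      · simp [h, not_lt_of_gt h, ne_of_lt h]
      · simp [h]
      · simp [h, not_lt_of_gt h, (ne_of_gt h), lt_asymm h]
    have hlen3 : lo.length + eqL.length + hi.length = xs.length := by
      have := hperm3.length_eq; simp at this; omega
    -- strict shrinking
    have hhi_lt : hi.length < xs.length := by
      rw [hhi]; exact List.length_filter_lt_length_iff_exists.mpr ⟨p, hpmem, by simp⟩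
    have hlo_lt : lo.length < xs.length := by
      rw [hlo]; exact List.length_filter_lt_length_iff_exists.mpr ⟨p, hpmem, by simp⟩
    -- eqL is a replicate of p
    have heqrep : eqL = List.replicate eqL.length p :=
      List.eq_replicate_iff.mpr ⟨rfl, hmem_eq⟩
    -- the canonical sorted form of s
    set A := lo.insertionSort (· ≤ ·) with hA
    set H := hi.insertionSort (· ≤ ·) with hH
    have hAperm : A.Perm lo := List.perm_insertionSort _ lo
    have hHperm : H.Perm hi := List.perm_insertionSort _ hi
    have hAsort : A.Pairwise (· ≤ ·) := List.sorted_insertionSort _ lo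
    have hHsort : H.Pairwise (· ≤ ·) := List.sorted_insertionSort _ hi
    have hAlen : A.length = lo.length := hAperm.length_eq
    have hHlen : H.length = hi.length := hHperm.length_eq
    have hs' : s = A ++ (List.replicate eqL.length p ++ H) := by
      apply List.eq_of_perm_of_sorted (le := (· ≤ ·))
      · intro a b _ _ h1 h2; exact le_antisymm h1 h2
      · exact hsort
      · rw [List.pairwise_append]
        refine ⟨hAsort, ?_, ?_⟩
        · rw [List.pairwise_append]
          refine ⟨List.pairwise_replicate.mpr (Or.inr le_rfl), hHsort, ?_⟩
          intro x hx y hy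
          have hxp : x = p := List.eq_of_mem_replicate hx
          have := hmem_hi y (hHperm.mem_iff.mp hy)
          omega
        · intro x hx y hy
          have hxp : x < p := hmem_lo x (hAperm.mem_iff.mp hx)
          rcases List.mem_append.mp hy with hy | hy
          · have := List.eq_of_mem_replicate hy; omega
          · have := hmem_hi y (hHperm.mem_iff.mp hy); omega
      · have hsp : (A ++ (List.replicate eqL.length p ++ H)).Perm xs := by
          refine List.Perm.trans ?_ hperm3
          exact List.Perm.append hAperm (List.Perm.append (by rw [← heqrep]) hHperm)
        exact hperm.trans hsp.symm
    rw [hs']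
    by_cases h3 : (k : Int) ≤ (hi.length : Int)
    · -- top-k lies entirely in hi
      rw [if_pos h3]
      have hkhi : k ≤ hi.length := by omega
      rw [List.drop_append, List.drop_append]
      rw [List.drop_eq_nil_of_le (by omega), List.drop_replicate]
      have e1 : xs.length - k - A.length - (List.replicate eqL.length p).length = hi.length - k := by
        simp [hAlen] <;> omega
      have e2 : eqL.length - (xs.length - k - A.length) = 0 := by
        simp [hAlen] <;> omega
      rw [e1, e2]
      simp only [List.replicate_zero, List.nil_append, List.sum_append, List.sum_nil]
      rw [IH hi H k (by omega) hHperm hHsort hkhi]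
    rw [if_neg h3]
    by_cases h4 : (k : Int) ≤ (hi.length : Int) + (eqL.length : Int)
    · -- top-k = all of hi plus part of the p-block
      rw [if_pos h4]
      rw [List.drop_append, List.drop_append]
      rw [List.drop_eq_nil_of_le (by omega), List.drop_replicate]
      have e2 : hi.length - (xs.length - k - A.length - (List.replicate eqL.length p).length) = hi.length := by simp [hAlen] <;> omega
      have e1 : eqL.length - (xs.length - k - A.length) = k - hi.length := by simp [hAlen] <;> omega
      rw [e1]
      have e3 : xs.length - k - A.length - (List.replicate eqL.length p).length = 0 := by simp [hAlen] <;> omega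
      rw [e3, List.drop_zero]
      simp only [List.nil_append, List.sum_append, List.sum_replicate, nsmul_eq_mul]
      rw [hHperm.sum_eq]
      have : ((k - hi.length : Nat) : Int) = (k : Int) - (hi.length : Int) := by
        push_cast; omega
      rw [this]; ring
    · -- top-k = all of hi, all of the p-block, and part of lo
      rw [if_neg h4]
      set k' := k - hi.length - eqL.length with hk'
      have hk'le : k' ≤ lo.length := by omega
      have hcast : (k : Int) - (hi.length : Int) - (eqL.length : Int) = ((k' : Nat) : Int) := by
        push_cast; omega
      rw [hcast]
      rw [IH lo A k' (by omega) hAperm hAsort hk'le]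
      rw [List.drop_append]
      have e1 : xs.length - k = lo.length - k' := by omega
      rw [e1]
      have e2 : lo.length - k' - A.length = 0 := by simp [hAlen] <;> omega
      rw [e2, List.drop_zero]
      have heqsum : eqL.sum = (eqL.length : Int) * p := by
        rw [heqrep]; simp [List.sum_replicate, nsmul_eq_mul]
      simp only [List.sum_append, List.sum_replicate, nsmul_eq_mul]
      rw [hHperm.sum_eq, heqsum]; ring

theorem pvInsertionSort_eq_sorted (xs : List Int) :
    xs.insertionSort (fun a b => a ≤ b) = PySem.List.sorted xs (fun x => x) false := by
  apply List.eq_of_perm_of_sorted (le := (· ≤ ·))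
  · intro a b _ _ h1 h2; exact le_antisymm h1 h2
  · exact List.sorted_insertionSort _ xs
  · simpa using PySem.List.sorted_pairwise xs (fun x => x)
  · exact (List.perm_insertionSort _ xs).trans (PySem.List.sorted_perm xs _ _).symm

theorem pvSorted_pairwise' (xs : List Int) :
    (PySem.List.sorted xs (fun x => x) false).Pairwise (· ≤ ·) := by
  simpa using PySem.List.sorted_pairwise xs (fun x => x)

theorem pvSv_length (numbers howMany : List Int) (h : numbers.length ≤ howMany.length) :
    (pvSv numbers howMany).length = numbers.length := by
  simp [pvSv]; omega

theorem pvA_closed (numbers howMany : List Int) (slots : Int)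
    (h : numbers.length ≤ howMany.length) :
    assignNumbers numbers howMany slots = pvTot numbers howMany -
      ((PySem.List.sorted (pvSv numbers howMany) (fun x => x) false).drop
        (PySem.List.clampIdx (pvSv numbers howMany).length (-slots))).sum := by
  simp only [assignNumbers]
  have htot : (PySem.List.enumerate numbers 0).foldl
      (fun acc p => acc + PySem.List.pyGetD howMany p.1 0 * pvDigits p.2) 0
      = pvTot numbers howMany := by
    rw [PySem.List.foldl_add _ (fun p : Int × Int => PySem.List.pyGetD howMany p.1 0 * pvDigits p.2) 0]
    rw [pvEnum_zip numbers howMany h (fun a b => a * pvDigits b)]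
    unfold pvTot
    simp
  have hsaved : (PySem.List.enumerate numbers 0).map
      (fun p => PySem.List.pyGetD howMany p.1 0 * pvDigits p.2 - 2 * PySem.List.pyGetD howMany p.1 0)
      = pvSv numbers howMany := by
    rw [pvEnum_zip numbers howMany h (fun a b => a * pvDigits b - 2 * a)]
    unfold pvSv
    apply List.map_congr_left
    intro p _; ring
  rw [htot, hsaved]
  rw [PySem.List.slice_some_none]
  rw [PySem.List.length_sorted]
  set sp := (PySem.List.sorted (pvSv numbers howMany) (fun x => x) false).drop
      (PySem.List.clampIdx (pvSv numbers howMany).length (-slots)) with hsp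
  rw [PySem.List.foldl_pyRange_zero_pyGetD' sp 0 (fun acc x => acc + x) 0]
  rw [PySem.List.foldl_add sp (fun x => x) 0]
  simp

theorem pvB_closed (numbers howMany : List Int) (slots : Int) :
    assignNumbers_alt numbers howMany slots = pvTot numbers howMany -
      pvSumKLargest (pvSv numbers howMany)
        (if ((pvSv numbers howMany).length : Int) < slots then (((pvSv numbers howMany).length : Int))
         else if 0 < slots then slots else 0) := by
  simp only [assignNumbers_alt]
  have htot : (numbers.zip howMany).foldl (fun acc p => acc + p.2 * pvDigits p.1) 0
      = pvTot numbers howMany := by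
    rw [PySem.List.foldl_add _ (fun p : Int × Int => p.2 * pvDigits p.1) 0]
    unfold pvTot; simp
  rw [htot]; rfl

theorem pvSumKLargest_zero (xs : List Int) : pvSumKLargest xs 0 = 0 := by
  rw [pvSumKLargest, pvSumKAux]; simp

theorem pvSumKLargest_drop (xs : List Int) (k : Nat) (hk : k ≤ xs.length) :
    pvSumKLargest xs (k : Int) =
      ((PySem.List.sorted xs (fun x => x) false).drop (xs.length - k)).sum := by
  exact pvSumK_drop (xs.length + 1) xs _ k (by omega)
    (PySem.List.sorted_perm xs _ _) (pvSorted_pairwise' xs) hk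

theorem assignNumbers_spec : Claim_unchanged_assignNumbers := by
  intro numbers howMany slots hDom hPre
  unfold Pre_assignNumbers at hPre
  unfold Spec_assignNumbers
  intro hnD
  rw [pvA_closed numbers howMany slots hPre, pvB_closed numbers howMany slots]
  set sv := pvSv numbers howMany with hsv
  have hsvlen : sv.length = numbers.length := pvSv_length numbers howMany hPre
  by_cases hpos : 0 < slots
  · set kN := min slots.toNat sv.length with hkN
    have hkval : (if (sv.length : Int) < slots then ((sv.length : Int))
        else if 0 < slots then slots else 0) = (kN : Int) := by
      split_ifs with h1 <;> (push_cast [hkN]; omega)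
    rw [hkval]
    have hslots : slots = ((slots.toNat : Nat) : Int) := by omega
    have hclamp : PySem.List.clampIdx sv.length (-slots) = sv.length - kN := by
      rw [hslots, PySem.List.clampIdx_neg_natCast sv.length slots.toNat (by omega)]
      omega
    rw [hclamp, pvSumKLargest_drop sv kN (by omega)]
  · have hkval : (if (sv.length : Int) < slots then ((sv.length : Int))
        else if 0 < slots then slots else 0) = (0 : Int) := by
      split_ifs with h1 h2 <;> omega
    rw [hkval]
    have h0 : pvSumKLargest sv 0 = 0 := pvSumKLargest_zero sv
    rw [h0]
    have hns : -slots = (((-slots).toNat : Nat) : Int) := by omega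
    rw [hns, PySem.List.clampIdx_natCast]
    by_cases hbig : (numbers.length : Int) ≤ -slots
    · have : min (-slots).toNat sv.length = sv.length := by omega
      rw [this]
      rw [List.drop_eq_nil_of_le (by rw [PySem.List.length_sorted])]
      simp
    · have hmin : min (-slots).toNat sv.length = (-slots).toNat := by omega
      rw [hmin]
      unfold D_assignNumbers at hnD
      push_neg at hnD
      have hsum := hnD (by omega) (by omega)
      have hconv : ((numbers.zip howMany).map (fun p => p.2 * (pvDigits p.1 - 2))) = sv := rfl
      rw [hconv, pvInsertionSort_eq_sorted sv] at hsum
      rw [hsum]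

theorem assignNumbers_tight : Claim_exact_assignNumbers := by
  intro numbers howMany slots hDom hPre hD
  unfold Pre_assignNumbers at hPre
  unfold D_assignNumbers at hD
  obtain ⟨h1, h2, h3⟩ := hD
  rw [pvA_closed numbers howMany slots hPre, pvB_closed numbers howMany slots]
  set sv := pvSv numbers howMany with hsv
  have hsvlen : sv.length = numbers.length := pvSv_length numbers howMany hPre
  have hkval : (if (sv.length : Int) < slots then ((sv.length : Int))
      else if 0 < slots then slots else 0) = (0 : Int) := by
    split_ifs with ha hb <;> omega
  rw [hkval, pvSumKLargest_zero sv]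
  have hns : -slots = (((-slots).toNat : Nat) : Int) := by omega
  rw [hns, PySem.List.clampIdx_natCast]
  have hmin : min (-slots).toNat sv.length = (-slots).toNat := by omega
  rw [hmin]
  have hconv : ((numbers.zip howMany).map (fun p => p.2 * (pvDigits p.1 - 2))) = sv := rfl
  rw [hconv, pvInsertionSort_eq_sorted sv] at h3
  omega

theorem assignNumbers_changed : Claim_changed_assignNumbers := by
  unfold Claim_changed_assignNumbers; decide
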